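-- pv_equiv track=rewrite | github.com/ftyers/tartu-parser | voting/vnew_voting.py | findMinimums
-- ===== SOURCE A (Python) =====
-- from collections import defaultdict
--
-- def findMinimums(arcs):
--     minArcs = defaultdict(tuple)
--     for j in arcs:
--         if j[0] != '0' or j[0] == '0':
--             try:
--                 if minArcs[j[1]][1] > arcs[j]:
--                     minArcs[j[1]] = (j[0], arcs[j])
--             except IndexError:
--                 minArcs[j[1]] = (j[0], arcs[j])
--     return minArcs
-- ===== SOURCE B (Python) =====
-- from collections import defaultdict
--
-- def findMinimums(arcs):
--     # group arcs by target, then take the per-bucket minimum (first-seen wins ties)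
--     groups = {}
--     for j in arcs:
--         groups[j[1]] = groups.get(j[1], []) + [(j[0], arcs[j])]
--     minArcs = defaultdict(tuple)
--     for tgt, bucket in groups.items():
--         minArcs[tgt] = min(bucket, key=lambda p: p[1])
--     return minArcs
-- ===== Notes on version B (the rewrite author's own statement) =====
-- stated objective: alternative
-- what changed: Replaces A's single running-minimum pass (with its try/except-IndexError probe into a defaultdict) by a group-then-reduce: one pass builds a dict of per-target buckets of (source, weight) pairs, then each bucket is reduced with min(key=weight), which keeps the first-seen arc on ties exactly like A's strict '>' update.
import Mathlib
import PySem

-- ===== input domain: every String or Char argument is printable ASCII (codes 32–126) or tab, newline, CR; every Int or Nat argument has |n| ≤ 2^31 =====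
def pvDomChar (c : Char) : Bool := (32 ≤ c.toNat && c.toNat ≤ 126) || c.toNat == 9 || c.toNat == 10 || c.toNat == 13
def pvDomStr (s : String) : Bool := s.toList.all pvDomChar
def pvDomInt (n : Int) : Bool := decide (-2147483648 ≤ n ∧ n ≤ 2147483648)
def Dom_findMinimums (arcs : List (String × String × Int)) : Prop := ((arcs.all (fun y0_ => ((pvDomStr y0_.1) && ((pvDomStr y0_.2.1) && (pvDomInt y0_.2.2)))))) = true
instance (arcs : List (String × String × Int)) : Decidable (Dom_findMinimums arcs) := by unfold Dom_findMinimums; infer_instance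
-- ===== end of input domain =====

-- B replaces A's single running-minimum pass by a group-by-target-then-reduce-with-min decomposition
-- (an alternative of the same cost); the proof shows it returns A's exact dict, items in the same order.
-- The 'arcs' dict (keyed by the (source, target) pair) is the association list of triples
-- (source, target, weight); 'for j in arcs: … arcs[j]' reads each key with its value, i.e. the entries.

-- ===== PORT A =====
-- one iteration of A's loop: the always-true guard, then the running-minimum update
-- (the try/except IndexError on minArcs[j[1]][1] is exactly the none-case of get?: a
-- defaultdict(tuple) yields () on a missing key and ()[1] raises IndexError, and both
-- branches then overwrite minArcs[j[1]], so the transient () is never observable)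
def pvStepA (minArcs : PySem.Dict String (String × Int)) (j : String × String × Int) :
    PySem.Dict String (String × Int) :=
  if (j.1 != "0") || (j.1 == "0") then
    match minArcs.get? j.2.1 with
    | some mv => if mv.2 > j.2.2 then minArcs.insert j.2.1 (j.1, j.2.2) else minArcs
    | none => minArcs.insert j.2.1 (j.1, j.2.2)
  else minArcs

def findMinimums (arcs : List (String × String × Int)) : List (String × String × Int) :=
  (arcs.foldl pvStepA PySem.Dict.empty).items

-- ===== PORT B =====
-- first pass: groups[j[1]] = groups.get(j[1], []) + [(j[0], arcs[j])]
def pvGroup (arcs : List (String × String × Int)) : PySem.Dict String (List (String × Int)) :=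
  arcs.foldl (fun g j => g.insert j.2.1 (g.getD j.2.1 [] ++ [(j.1, j.2.2)])) PySem.Dict.empty

-- hand port of Python's min(bucket, key=lambda p: p[1]) — the running minimum keeping the
-- first-seen element on ties (exact for nonempty b; the [] case is a totality default never
-- reached, since every bucket built by pvGroup is nonempty)
def pvMinBy (b : List (String × Int)) : String × Int :=
  match b with
  | [] => ("", 0)
  | x :: t => t.foldl (fun best p => if p.2 < best.2 then p else best) x

def findMinimums_alt (arcs : List (String × String × Int)) : List (String × String × Int) :=
  ((pvGroup arcs).items.foldl
      (fun (minArcs : PySem.Dict String (String × Int)) p => minArcs.insert p.1 (pvMinBy p.2))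
      PySem.Dict.empty).items

-- ===== PRECONDITION & SPEC =====
def Spec_findMinimums (arcs : List (String × String × Int)) (out : List (String × String × Int)) : Prop := out = findMinimums_alt arcs
instance (arcs : List (String × String × Int)) (out : List (String × String × Int)) : Decidable (Spec_findMinimums arcs out) := by unfold Spec_findMinimums; infer_instance

-- ===== CLAIM (what is proved, stated in full; the proofs are below) =====
def Claim_equal_findMinimums : Prop := ∀ (arcs : List (String × String × Int)), Dom_findMinimums arcs → Spec_findMinimums arcs (findMinimums arcs)

-- ===== LEMMAS AND PROOFS =====

-- the rendering of a grouping dict: pick the per-bucket minimum, keeping item order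
def pvRender (g : PySem.Dict String (List (String × Int))) : PySem.Dict String (String × Int) :=
  PySem.Dict.mk (g.items.map (fun p => (p.1, pvMinBy p.2)))

theorem pvRender_get? (g : PySem.Dict String (List (String × Int))) (k : String) :
    (pvRender g).get? k = (g.get? k).map pvMinBy := by
  obtain ⟨l⟩ := g
  induction l with
  | nil => rfl
  | cons p t ih =>
    simp only [pvRender] at *
    rw [List.map_cons, PySem.Dict.get?_mk_cons, PySem.Dict.get?_mk_cons]
    by_cases h : p.1 == k
    · simp [h]
    · simp only [h, Bool.false_eq_true, if_false]; exact ih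

theorem pvMinBy_append (b : List (String × Int)) (hb : b ≠ []) (x : String × Int) :
    pvMinBy (b ++ [x]) = if x.2 < (pvMinBy b).2 then x else pvMinBy b := by
  obtain ⟨y, t, rfl⟩ := List.exists_cons_of_ne_nil hb
  simp [pvMinBy]

theorem pvRender_contains (g : PySem.Dict String (List (String × Int))) (k : String) :
    (pvRender g).contains k = g.contains k := by
  rw [PySem.Dict.contains_eq_isSome_get?, PySem.Dict.contains_eq_isSome_get?, pvRender_get?,
    Option.isSome_map]

theorem pvStep_commutes (g : PySem.Dict String (List (String × Int)))
    (hnd : g.keys.Nodup) (hne : ∀ p ∈ g.items, p.2 ≠ []) (j : String × String × Int) :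
    pvStepA (pvRender g) j = pvRender (g.insert j.2.1 (g.getD j.2.1 [] ++ [(j.1, j.2.2)])) := by
  obtain ⟨a, b, w⟩ := j
  have hguard : ((a != "0") || (a == "0")) = true := by
    by_cases h : a = "0" <;> simp [h]
  unfold pvStepA
  simp only [hguard, if_true]
  rcases hg : g.get? b with _ | bucket
  · -- b not yet a key
    have hc : g.contains b = false := by
      rw [PySem.Dict.contains_eq_isSome_get?, hg]; rfl
    have hcr : (pvRender g).contains b = false := by rw [pvRender_contains]; exact hc
    rw [pvRender_get?, hg]
    simp only [Option.map_none]
    apply PySem.Dict.ext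
    rw [PySem.Dict.getD_of_get?_eq_none _ _ hg]
    show ((pvRender g).insert b (a, w)).items
      = (g.insert b ([] ++ [(a, w)])).items.map (fun p => (p.1, pvMinBy p.2))
    rw [PySem.Dict.items_insert_of_not_contains _ _ hcr,
      PySem.Dict.items_insert_of_not_contains _ _ hc]
    simp [pvRender, pvMinBy]
  · -- b present with bucket
    have hmem : (b, bucket) ∈ g.items := PySem.Dict.mem_items_of_get?_eq_some _ hg
    have hbne : bucket ≠ [] := hne _ hmem
    have hc : g.contains b = true := by
      rw [PySem.Dict.contains_eq_isSome_get?, hg]; rfl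
    have hcr : (pvRender g).contains b = true := by rw [pvRender_contains]; exact hc
    have hgd : g.getD b [] = bucket := PySem.Dict.getD_of_get?_eq_some _ _ hg
    rw [pvRender_get?, hg]
    simp only [Option.map_some, hgd]
    by_cases h2 : w < (pvMinBy bucket).2
    · simp only [gt_iff_lt, h2, if_true]
      apply PySem.Dict.ext
      rw [PySem.Dict.items_insert_of_contains _ _ hcr]
      show (pvRender g).items.map _ = (g.insert b (bucket ++ [(a,w)])).items.map (fun p => (p.1, pvMinBy p.2))
      rw [PySem.Dict.items_insert_of_contains _ _ hc]
      simp only [pvRender, List.map_map]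
      apply List.map_congr_left
      intro p _
      by_cases hp : p.1 = b
      · simp [hp, pvMinBy_append bucket hbne, h2]
      · simp [hp]
    · simp only [gt_iff_lt, h2, if_false]
      apply PySem.Dict.ext
      show (pvRender g).items = (g.insert b (bucket ++ [(a,w)])).items.map (fun p => (p.1, pvMinBy p.2))
      rw [PySem.Dict.items_insert_of_contains _ _ hc]
      simp only [pvRender, List.map_map]
      apply List.map_congr_left
      intro p hp
      by_cases hpb : p.1 = b
      · have hpe : p.2 = bucket := by
          have := PySem.Dict.get?_of_mem_items _ hp hnd
          rw [hpb, hg] at this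
          exact (Option.some.injEq _ _ ▸ this).symm
        simp [pvMinBy_append bucket hbne, h2, hpb, hpe]
      · simp [hpb]

theorem pvMain (arcs : List (String × String × Int))
    (g : PySem.Dict String (List (String × Int)))
    (hnd : g.keys.Nodup) (hne : ∀ p ∈ g.items, p.2 ≠ []) :
    List.foldl pvStepA (pvRender g) arcs
      = pvRender (List.foldl (fun g j => g.insert j.2.1 (g.getD j.2.1 [] ++ [(j.1, j.2.2)])) g arcs) := by
  induction arcs generalizing g with
  | nil => rfl
  | cons j rest ih =>
    rw [List.foldl_cons, List.foldl_cons, pvStep_commutes g hnd hne j]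
    apply ih
    · exact PySem.Dict.nodup_keys_insert _ _ _ hnd
    · intro p hp
      rcases (PySem.Dict.mem_items_insert _ _ _ _).mp hp with h | h
      · subst h; simp
      · exact hne _ h.1

theorem pvGroup_nodup (arcs : List (String × String × Int)) : (pvGroup arcs).keys.Nodup :=
  PySem.Dict.nodup_keys_foldl_insert_key arcs (fun j => j.2.1)
    (fun g j => g.getD j.2.1 [] ++ [(j.1, j.2.2)]) PySem.Dict.empty PySem.Dict.nodup_keys_empty

theorem pvFinal (arcs : List (String × String × Int)) :
    findMinimums arcs = findMinimums_alt arcs := by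
  show (arcs.foldl pvStepA PySem.Dict.empty).items
      = ((pvGroup arcs).items.foldl
          (fun (m : PySem.Dict String (String × Int)) p => m.insert p.1 (pvMinBy p.2))
          PySem.Dict.empty).items
  have h1 : (arcs.foldl pvStepA PySem.Dict.empty) = pvRender (pvGroup arcs) := by
    have := pvMain arcs PySem.Dict.empty PySem.Dict.nodup_keys_empty (by intro p hp; cases hp)
    simpa [pvGroup] using this
  rw [h1]
  rw [PySem.Dict.items_foldl_insert_fresh (pvGroup arcs).items (fun p => p.1) (fun p => pvMinBy p.2)
    PySem.Dict.empty (fun a _ => PySem.Dict.contains_empty a.1) (pvGroup_nodup arcs)]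
  rfl

-- ===== VERDICT (by name: the statement is the Claim_ definition above) =====
theorem findMinimums_spec : Claim_equal_findMinimums := by
  intro arcs _
  exact pvFinal arcs
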